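-- pv_equiv track=rewrite | github.com/AnjaTRPES/TRPES-simulator | python files/fit_class2nd.py | compare_fit_fixed_constants
-- ===== SOURCE A (Python) =====
-- def compare_fit_fixed_constants(fixed_constants,whats_fixed,values_to_be_fitted,values_to_be_fitted_what):
--     to_be_popped=[]
--     to_be_popped_what=[]
--     for n in range(len(values_to_be_fitted_what)):
--         #print 'values_to_be_fitted_what'
--         if values_to_be_fitted_what[n] in whats_fixed:
--             to_be_popped.append(values_to_be_fitted[n])
--             to_be_popped_what.append(values_to_be_fitted_what[n])
--     for value in to_be_popped:
--         values_to_be_fitted.remove(value)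
--     for value in to_be_popped_what:
--         values_to_be_fitted_what.remove(value)
--     return values_to_be_fitted,values_to_be_fitted_what
-- ===== SOURCE B (Python) =====
-- def compare_fit_fixed_constants(fixed_constants, whats_fixed, values_to_be_fitted, values_to_be_fitted_what):
--     # One pass to count what must go, one pass per list to filter-keep survivors in order.
--     fixed = set(whats_fixed)
--     pop_vals = {}
--     pop_whats = {}
--     for n, w in enumerate(values_to_be_fitted_what):
--         if w in fixed:
--             v = values_to_be_fitted[n]
--             pop_vals[v] = pop_vals.get(v, 0) + 1
--             pop_whats[w] = pop_whats.get(w, 0) + 1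
--     kept_vals = []
--     for v in values_to_be_fitted:
--         c = pop_vals.get(v, 0)
--         if c > 0:
--             pop_vals[v] = c - 1
--         else:
--             kept_vals.append(v)
--     kept_whats = []
--     for w in values_to_be_fitted_what:
--         c = pop_whats.get(w, 0)
--         if c > 0:
--             pop_whats[w] = c - 1
--         else:
--             kept_whats.append(w)
--     values_to_be_fitted[:] = kept_vals
--     values_to_be_fitted_what[:] = kept_whats
--     return values_to_be_fitted, values_to_be_fitted_what
-- ===== Notes on version B (the rewrite author's own statement) =====
-- stated objective: faster
-- what changed: Instead of collecting the to-be-removed values and then calling list.remove (a linear scan) once per collected value, B builds count dictionaries of the values to drop in one pass and then filters each list in a single pass, decrementing the counters, which reproduces remove's first-occurrences-by-value deletion; lists are mutated in place as in A.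
import Mathlib
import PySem

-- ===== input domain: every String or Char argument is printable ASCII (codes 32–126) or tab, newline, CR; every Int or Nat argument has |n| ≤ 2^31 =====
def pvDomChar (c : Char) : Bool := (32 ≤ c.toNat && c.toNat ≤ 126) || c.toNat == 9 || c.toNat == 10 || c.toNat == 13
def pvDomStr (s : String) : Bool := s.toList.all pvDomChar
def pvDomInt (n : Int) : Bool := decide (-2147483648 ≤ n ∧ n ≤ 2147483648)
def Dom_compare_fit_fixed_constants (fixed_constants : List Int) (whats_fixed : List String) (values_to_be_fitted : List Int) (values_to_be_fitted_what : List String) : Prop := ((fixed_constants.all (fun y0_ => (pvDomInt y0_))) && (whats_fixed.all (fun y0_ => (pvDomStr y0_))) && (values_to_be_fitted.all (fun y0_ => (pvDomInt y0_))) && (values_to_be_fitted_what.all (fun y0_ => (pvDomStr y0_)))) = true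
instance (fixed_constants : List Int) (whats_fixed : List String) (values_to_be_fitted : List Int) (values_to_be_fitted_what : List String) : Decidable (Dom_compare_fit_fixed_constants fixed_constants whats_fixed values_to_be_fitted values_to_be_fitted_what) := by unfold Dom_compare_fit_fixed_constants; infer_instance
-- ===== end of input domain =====

-- B replaces A's repeated list.remove scans by counting dictionaries and one filtering pass
-- per list (faster); both Pythons mutate values_to_be_fitted/values_to_be_fitted_what in the
-- same way, and equivalence is proved about the RETURN value.

-- ===== PORT A =====
-- loop 1: collect the values/labels to be popped; none = IndexError on values_to_be_fitted[n]
def pvACollect (whats_fixed : List String) (values_to_be_fitted : List Int) (values_to_be_fitted_what : List String) : Option (List Int × List String) :=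
  (PySem.List.pyRange 0 (values_to_be_fitted_what.length : Int) 1).foldl
    (fun acc n =>
      match acc with
      | none => none
      | some (tp, tpw) =>
        match PySem.List.pyGet? values_to_be_fitted_what n with
        | none => none
        | some w =>
          if w ∈ whats_fixed then
            match PySem.List.pyGet? values_to_be_fitted n with
            | none => none
            | some v => some (tp ++ [v], tpw ++ [w])
          else some (tp, tpw))
    (some ([], []))

-- loops 2/3: 'for value in P: l.remove(value)'; none = ValueError (never reached from pvACollect's output)
def pvARemoveAll {α : Type} [BEq α] (l : List α) (P : List α) : Option (List α) :=
  P.foldl (fun acc v => match acc with | none => none | some l' => PySem.List.remove? l' v) (some l)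

def compare_fit_fixed_constants (fixed_constants : List Int) (whats_fixed : List String) (values_to_be_fitted : List Int) (values_to_be_fitted_what : List String) : List Int × List String :=
  match pvACollect whats_fixed values_to_be_fitted values_to_be_fitted_what with
  | none => ([], [])          -- IndexError: excluded by Pre_
  | some (tp, tpw) =>
    match pvARemoveAll values_to_be_fitted tp, pvARemoveAll values_to_be_fitted_what tpw with
    | some vs', some vw' => (vs', vw')
    | _, _ => ([], [])        -- ValueError: unreachable

-- ===== PORT B =====
-- counting pass over enumerate(values_to_be_fitted_what); none = IndexError on values_to_be_fitted[n]
def pvBCounts (whats_fixed : List String) (values_to_be_fitted : List Int) (values_to_be_fitted_what : List String) : Option (PySem.Dict Int Int × PySem.Dict String Int) :=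
  (PySem.List.enumerate values_to_be_fitted_what 0).foldl
    (fun acc p =>
      match acc with
      | none => none
      | some (dv, dw) =>
        if PySem.Set.contains (PySem.Set.ofList whats_fixed) p.2 then
          match PySem.List.pyGet? values_to_be_fitted p.1 with
          | none => none
          | some v => some (dv.insert v (dv.getD v 0 + 1), dw.insert p.2 (dw.getD p.2 0 + 1))
        else some (dv, dw))
    (some (PySem.Dict.empty, PySem.Dict.empty))

-- filtering pass: keep x unless its counter is still positive (then decrement instead)
def pvBStep {α : Type} [BEq α] (acc : List α × PySem.Dict α Int) (x : α) : List α × PySem.Dict α Int :=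
  let c := acc.2.getD x 0
  if 0 < c then (acc.1, acc.2.insert x (c - 1)) else (acc.1 ++ [x], acc.2)

def pvBFilter {α : Type} [BEq α] (d : PySem.Dict α Int) (l : List α) : List α :=
  (l.foldl pvBStep ([], d)).1

def compare_fit_fixed_constants_alt (fixed_constants : List Int) (whats_fixed : List String) (values_to_be_fitted : List Int) (values_to_be_fitted_what : List String) : List Int × List String :=
  match pvBCounts whats_fixed values_to_be_fitted values_to_be_fitted_what with
  | none => ([], [])          -- IndexError: excluded by Pre_
  | some (dv, dw) => (pvBFilter dv values_to_be_fitted, pvBFilter dw values_to_be_fitted_what)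

-- ===== PRECONDITION & SPEC =====
-- Pre_ excludes exactly the inputs where Python A raises IndexError: an index n whose label is
-- fixed but which is out of range of values_to_be_fitted (B raises IndexError there too).
def Pre_compare_fit_fixed_constants (fixed_constants : List Int) (whats_fixed : List String) (values_to_be_fitted : List Int) (values_to_be_fitted_what : List String) : Prop :=
  ∀ n : Nat, n < values_to_be_fitted_what.length →
    values_to_be_fitted_what.getD n "" ∈ whats_fixed → n < values_to_be_fitted.length
instance (fixed_constants : List Int) (whats_fixed : List String) (values_to_be_fitted : List Int) (values_to_be_fitted_what : List String) : Decidable (Pre_compare_fit_fixed_constants fixed_constants whats_fixed values_to_be_fitted values_to_be_fitted_what) := by unfold Pre_compare_fit_fixed_constants; infer_instance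

def pvWitness_compare_fit_fixed_constants : List Int × List String × List Int × List String :=
  ([3], ["a"], [1, 1, 2], ["a", "b", "a"])

def Spec_compare_fit_fixed_constants (fixed_constants : List Int) (whats_fixed : List String) (values_to_be_fitted : List Int) (values_to_be_fitted_what : List String) (out : List Int × List String) : Prop := out = compare_fit_fixed_constants_alt fixed_constants whats_fixed values_to_be_fitted values_to_be_fitted_what
instance (fixed_constants : List Int) (whats_fixed : List String) (values_to_be_fitted : List Int) (values_to_be_fitted_what : List String) (out : List Int × List String) : Decidable (Spec_compare_fit_fixed_constants fixed_constants whats_fixed values_to_be_fitted values_to_be_fitted_what out) := by unfold Spec_compare_fit_fixed_constants; infer_instance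

-- ===== CLAIM (what is proved, stated in full; the proofs are below) =====
def Claim_equal_compare_fit_fixed_constants : Prop := ∀ (fixed_constants : List Int) (whats_fixed : List String) (values_to_be_fitted : List Int) (values_to_be_fitted_what : List String), Dom_compare_fit_fixed_constants fixed_constants whats_fixed values_to_be_fitted values_to_be_fitted_what → Pre_compare_fit_fixed_constants fixed_constants whats_fixed values_to_be_fitted values_to_be_fitted_what → Spec_compare_fit_fixed_constants fixed_constants whats_fixed values_to_be_fitted values_to_be_fitted_what (compare_fit_fixed_constants fixed_constants whats_fixed values_to_be_fitted values_to_be_fitted_what)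

-- ===== LEMMAS AND PROOFS =====

-- Reference filter: drop the first (c x) occurrences of each value x, keep the rest in order.
def pvCF {α : Type} [DecidableEq α] (c : α → Nat) : List α → List α
  | [] => []
  | x :: l => if 0 < c x then pvCF (fun y => if y = x then c x - 1 else c y) l else x :: pvCF c l

lemma pvCF_congr {α : Type} [DecidableEq α] {c c' : α → Nat} (h : ∀ v, c v = c' v) (l : List α) :
    pvCF c l = pvCF c' l := by
  have : c = c' := funext h
  rw [this]

lemma pvCF_zero {α : Type} [DecidableEq α] (l : List α) : pvCF (fun _ => 0) l = l := by
  induction l with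
  | nil => rfl
  | cons x xs ih => simp [pvCF, ih]

lemma pvCF_erase {α : Type} [BEq α] [LawfulBEq α] [DecidableEq α] (v : α) (l : List α) (hv : v ∈ l) (c : α → Nat) :
    pvCF c (l.erase v) = pvCF (fun y => if y = v then c y + 1 else c y) l := by
  induction l generalizing c with
  | nil => cases hv
  | cons x xs ih =>
    by_cases hxv : x = v
    · subst hxv
      rw [List.erase_cons_head]
      conv_rhs => rw [pvCF]
      rw [if_pos (by simp)]
      exact pvCF_congr (fun y => by by_cases h : y = x <;> simp [h]) xs
    · have hv' : v ∈ xs := by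
        rcases List.mem_cons.mp hv with h | h
        · exact absurd h.symm hxv
        · exact h
      rw [List.erase_cons_tail (by simpa using hxv)]
      by_cases hc : 0 < c x
      · rw [pvCF, if_pos hc]
        conv_rhs => rw [pvCF]
        rw [if_pos (by simpa [hxv] using hc)]
        rw [ih hv' _]
        refine pvCF_congr (fun y => ?_) xs
        by_cases h1 : y = x
        · subst h1; simp [hxv]
        · by_cases h2 : y = v <;> simp [h1, h2, Ne.symm hxv]
      · rw [pvCF, if_neg hc]
        conv_rhs => rw [pvCF]
        rw [if_neg (by simpa [hxv] using hc)]
        rw [ih hv' c]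

lemma pvARemoveAll_eq_pvCF {α : Type} [BEq α] [LawfulBEq α] [DecidableEq α] :
    ∀ (P l : List α), (∀ v, P.count v ≤ l.count v) →
      pvARemoveAll l P = some (pvCF (fun v => P.count v) l) := by
  intro P
  induction P with
  | nil =>
    intro l h
    unfold pvARemoveAll
    rw [List.foldl_nil]
    rw [pvCF_congr (c' := fun _ => 0) (fun v => by simp) l, pvCF_zero]
  | cons p P ih =>
    intro l h
    have hp : p ∈ l := by
      have h1 := h p
      have hpos : 0 < l.count p := by simp at h1; omega
      exact List.count_pos_iff.mp hpos
    unfold pvARemoveAll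
    rw [List.foldl_cons]
    have hrem : (match (some l : Option (List α)) with
        | none => none | some l' => PySem.List.remove? l' p) = PySem.List.remove? l p := rfl
    rw [hrem, PySem.List.remove?_eq_some_erase l p hp]
    have hcnt : ∀ v, P.count v ≤ (l.erase p).count v := by
      intro v
      have h1 := h v
      rw [List.count_erase]
      by_cases hvp : v = p <;> simp [List.count_cons, hvp] at h1 ⊢ <;> omega
    have hih := ih (l.erase p) hcnt
    unfold pvARemoveAll at hih
    rw [hih]
    congr 1
    rw [pvCF_erase p l hp]
    refine pvCF_congr (fun v => ?_) l
    by_cases hvp : v = p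
    · simp [hvp]
    · simp [hvp, Ne.symm hvp]

lemma pvBFilter_go {α : Type} [BEq α] [LawfulBEq α] [DecidableEq α] :
    ∀ (l acc : List α) (d : PySem.Dict α Int) (c : α → Nat),
      (∀ v, d.getD v 0 = (c v : Int)) →
      (l.foldl pvBStep (acc, d)).1 = acc ++ pvCF c l := by
  intro l
  induction l with
  | nil => intro acc d c hd; simp [pvCF]
  | cons x l ih =>
    intro acc d c hd
    rw [List.foldl_cons]
    have hdx := hd x
    by_cases hc : 0 < c x
    · have hpos : (0 : Int) < d.getD x 0 := by rw [hdx]; exact_mod_cast hc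
      rw [show pvBStep (acc, d) x = (acc, d.insert x (d.getD x 0 - 1)) from by
        simp [pvBStep, if_pos hpos]]
      rw [ih acc _ (fun y => if y = x then c x - 1 else c y) ?_]
      · rw [pvCF, if_pos hc]
      · intro v
        rw [PySem.Dict.getD_insert]
        by_cases hvx : v = x
        · subst hvx
          simp [hdx]
          omega
        · rw [if_neg hvx, hd v]
          simp [hvx]
    · have hneg : ¬ (0 : Int) < d.getD x 0 := by rw [hdx]; exact_mod_cast hc
      rw [show pvBStep (acc, d) x = (acc ++ [x], d) from by simp [pvBStep, if_neg hneg]]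
      rw [ih (acc ++ [x]) d c hd]
      rw [pvCF, if_neg hc]
      simp

-- count dictionary built by B's counting pass
def pvCnt {α : Type} [BEq α] (P : List α) : PySem.Dict α Int :=
  P.foldl (fun d x => d.insert x (d.getD x 0 + 1)) PySem.Dict.empty

lemma pvCnt_getD {α : Type} [BEq α] [LawfulBEq α] (P : List α) (v : α) :
    (pvCnt P).getD v 0 = (P.count v : Int) := by
  unfold pvCnt
  rw [PySem.Dict.getD_foldl_insert_add_one]
  simp

-- the two first loops run in lock-step: A's collected lists determine B's dictionaries,
-- and the collected lists are sublists of (prefixes of) the scanned lists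
lemma pvCnt_append {α : Type} [BEq α] (P : List α) (v : α) :
    pvCnt (P ++ [v]) = (pvCnt P).insert v ((pvCnt P).getD v 0 + 1) := by
  unfold pvCnt
  rw [List.foldl_append]
  rfl

lemma pv_collect_inv (whats_fixed : List String) (values_to_be_fitted : List Int)
    (values_to_be_fitted_what : List String)
    (hpre : ∀ n : Nat, n < values_to_be_fitted_what.length →
      values_to_be_fitted_what.getD n "" ∈ whats_fixed → n < values_to_be_fitted.length) :
    ∀ k : Nat, k ≤ values_to_be_fitted_what.length →
      ∃ tp tpw,
        ((PySem.List.pyRange 0 (k : Int) 1).foldl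
          (fun acc n =>
            match acc with
            | none => none
            | some (tp, tpw) =>
              match PySem.List.pyGet? values_to_be_fitted_what n with
              | none => none
              | some w =>
                if w ∈ whats_fixed then
                  match PySem.List.pyGet? values_to_be_fitted n with
                  | none => none
                  | some v => some (tp ++ [v], tpw ++ [w])
                else some (tp, tpw))
          (some ([], []))) = some (tp, tpw) ∧
        (((PySem.List.enumerate values_to_be_fitted_what 0).take k).foldl
          (fun (acc : Option (PySem.Dict Int Int × PySem.Dict String Int)) p =>
            match acc with
            | none => none
            | some (dv, dw) =>
              if PySem.Set.contains (PySem.Set.ofList whats_fixed) p.2 then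
                match PySem.List.pyGet? values_to_be_fitted p.1 with
                | none => none
                | some v => some (dv.insert v (dv.getD v 0 + 1), dw.insert p.2 (dw.getD p.2 0 + 1))
              else some (dv, dw))
          (some (PySem.Dict.empty, PySem.Dict.empty))) = some (pvCnt tp, pvCnt tpw) ∧
        tp.Sublist (values_to_be_fitted.take k) ∧ tpw.Sublist (values_to_be_fitted_what.take k) := by
  intro k
  induction k with
  | zero =>
    intro _
    refine ⟨[], [], ?_, ?_, List.nil_sublist _, List.nil_sublist _⟩
    · rw [show ((0 : Nat) : Int) = 0 from rfl, PySem.List.pyRange_one_eq_nil le_rfl]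
      rfl
    · rw [List.take_zero]
      rfl
  | succ k ihk =>
    intro hk1
    have hk : k ≤ values_to_be_fitted_what.length := by omega
    have hkw : k < values_to_be_fitted_what.length := by omega
    obtain ⟨tp, tpw, hA, hB, hs1, hs2⟩ := ihk hk
    have hrange : PySem.List.pyRange 0 ((k + 1 : Nat) : Int) 1
        = PySem.List.pyRange 0 (k : Int) 1 ++ [(k : Int)] := by
      push_cast
      exact PySem.List.pyRange_one_succ_right (by positivity)
    have hgetw : PySem.List.pyGet? values_to_be_fitted_what (k : Int)
        = some values_to_be_fitted_what[k] := by
      simp [PySem.List.pyGet?_natCast, List.getElem?_eq_getElem hkw]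
    have htakeE : (PySem.List.enumerate values_to_be_fitted_what 0).take (k + 1)
        = (PySem.List.enumerate values_to_be_fitted_what 0).take k
          ++ [((k : Int), values_to_be_fitted_what[k])] := by
      rw [List.take_add_one, PySem.List.getElem?_enumerate]
      simp [List.getElem?_eq_getElem hkw]
    by_cases hw : values_to_be_fitted_what[k] ∈ whats_fixed
    · have hkv : k < values_to_be_fitted.length := by
        refine hpre k hkw ?_
        rw [List.getD_eq_getElem _ _ hkw]
        exact hw
      have hgetv : PySem.List.pyGet? values_to_be_fitted (k : Int)
          = some values_to_be_fitted[k] := by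
        simp [PySem.List.pyGet?_natCast, List.getElem?_eq_getElem hkv]
      refine ⟨tp ++ [values_to_be_fitted[k]], tpw ++ [values_to_be_fitted_what[k]], ?_, ?_, ?_, ?_⟩
      · rw [hrange, List.foldl_append, hA]
        simp [hgetw, hgetv, hw]
      · rw [htakeE, List.foldl_append, hB]
        simp [hgetv, pvCnt_append]
        intro h
        exact absurd hw h
      · rw [List.take_add_one, List.getElem?_eq_getElem hkv]
        exact hs1.append (List.Sublist.refl _)
      · rw [List.take_add_one, List.getElem?_eq_getElem hkw]
        exact hs2.append (List.Sublist.refl _)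
    · refine ⟨tp, tpw, ?_, ?_, ?_, ?_⟩
      · rw [hrange, List.foldl_append, hA]
        simp [hgetw, hw]
      · rw [htakeE, List.foldl_append, hB]
        simp
        intro h
        exact absurd h hw
      · exact hs1.trans (List.take_sublist_take_left (by omega))
      · exact hs2.trans (List.take_sublist_take_left (by omega))

-- ===== VERDICT (by name: the statement is the Claim_ definition above) =====
theorem compare_fit_fixed_constants_spec : Claim_equal_compare_fit_fixed_constants := by
  intro fixed_constants whats_fixed values_to_be_fitted values_to_be_fitted_what _hdom hpre
  unfold Spec_compare_fit_fixed_constants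
  obtain ⟨tp, tpw, hA, hB, hs1, hs2⟩ :=
    pv_collect_inv whats_fixed values_to_be_fitted values_to_be_fitted_what hpre
      values_to_be_fitted_what.length le_rfl
  rw [List.take_of_length_le (le_of_eq (PySem.List.length_enumerate _ _))] at hB
  have hc1 : ∀ v, tp.count v ≤ values_to_be_fitted.count v := fun v =>
    le_trans (hs1.count_le v) ((List.take_sublist _ _).count_le v)
  have hc2 : ∀ v, tpw.count v ≤ values_to_be_fitted_what.count v := fun v =>
    le_trans (hs2.count_le v) ((List.take_sublist _ _).count_le v)
  have hA' : pvACollect whats_fixed values_to_be_fitted values_to_be_fitted_what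
      = some (tp, tpw) := hA
  have hB' : pvBCounts whats_fixed values_to_be_fitted values_to_be_fitted_what
      = some (pvCnt tp, pvCnt tpw) := hB
  unfold compare_fit_fixed_constants compare_fit_fixed_constants_alt
  rw [hA', hB']
  show (match pvARemoveAll values_to_be_fitted tp, pvARemoveAll values_to_be_fitted_what tpw with
      | some vs', some vw' => (vs', vw')
      | _, _ => ([], []))
    = (pvBFilter (pvCnt tp) values_to_be_fitted, pvBFilter (pvCnt tpw) values_to_be_fitted_what)
  rw [pvARemoveAll_eq_pvCF tp values_to_be_fitted hc1,
      pvARemoveAll_eq_pvCF tpw values_to_be_fitted_what hc2]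
  unfold pvBFilter
  rw [pvBFilter_go values_to_be_fitted [] (pvCnt tp) (fun v => tp.count v)
        (fun v => pvCnt_getD tp v),
      pvBFilter_go values_to_be_fitted_what [] (pvCnt tpw) (fun v => tpw.count v)
        (fun v => pvCnt_getD tpw v)]
  simp
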